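-- pv_equiv track=rewrite | github.com/CodeTreatise/React-Guide | fix_liquid.py | fix_template_literals
-- ===== SOURCE A (Python) =====
-- def fix_template_literals(content):
--     """Fix template literals by wrapping entire code blocks with raw tags."""
--     lines = content.split('\n')
--     result_lines = []
--     in_code_block = False
--     code_block_lines = []
--
--     for line in lines:
--         if line.strip().startswith('```'):
--             if in_code_block:
--                 # End of code block - check if it has template literals
--                 code_content = '\n'.join(code_block_lines)
--                 if '${' in code_content:
--                     # Wrap the entire code block content with raw tags
--                     result_lines.append('{% raw %}')
--                     result_lines.extend(code_block_lines)
--                     result_lines.append('{% endraw %}')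
--                 else:
--                     result_lines.extend(code_block_lines)
--                 result_lines.append(line)  # Add closing ```
--                 code_block_lines = []
--                 in_code_block = False
--             else:
--                 # Start of code block
--                 result_lines.append(line)  # Add opening ```
--                 in_code_block = True
--         elif in_code_block:
--             code_block_lines.append(line)
--         else:
--             result_lines.append(line)
--
--     return '\n'.join(result_lines)
-- ===== SOURCE B (Python) =====
-- def fix_template_literals(content):
--     """Wrap fenced code blocks containing template literals in {% raw %} tags.
--
--     Scans block-by-block: at an opening fence, jump ahead to the matching
--     closing fence and emit the whole block at once.  Unlike A, the lines of a
--     final unclosed code block are kept in the output instead of being dropped.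
--     """
--     lines = content.split('\n')
--     is_fence = lambda l: l.strip().startswith('```')
--     out = []
--     i = 0
--     n = len(lines)
--     while i < n:
--         line = lines[i]
--         out.append(line)
--         i += 1
--         if is_fence(line):
--             block = []
--             while i < n and not is_fence(lines[i]):
--                 block.append(lines[i])
--                 i += 1
--             if i < n:
--                 # complete block: lines[i] is the closing fence
--                 if '${' in '\n'.join(block):
--                     out.append('{% raw %}')
--                     out.extend(block)
--                     out.append('{% endraw %}')
--                 else:
--                     out.extend(block)
--                 out.append(lines[i])
--                 i += 1
--             else:
--                 # unclosed final block: keep its content (A silently drops it)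
--                 out.extend(block)
--     return '\n'.join(out)
-- ===== Notes on version B (the rewrite author's own statement) =====
-- stated objective: alternative
-- what changed: Replaces A's line-by-line state machine (in_code_block flag plus an accumulating buffer) by a block-at-a-time scan that, at each opening fence, jumps to the matching closing fence and emits the whole block at once; a final unclosed block's lines are kept instead of silently dropped.
-- intended difference: On inputs whose number of fence lines is odd and whose last line is not a fence (a final unclosed code block with content), A silently drops the lines after the last fence while B keeps them; keeping the author's content is the intended behaviour. — e.g. on fix_template_literals("```\n${x}"): A returns "```", B returns "```\n${x}"
import Mathlib
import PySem

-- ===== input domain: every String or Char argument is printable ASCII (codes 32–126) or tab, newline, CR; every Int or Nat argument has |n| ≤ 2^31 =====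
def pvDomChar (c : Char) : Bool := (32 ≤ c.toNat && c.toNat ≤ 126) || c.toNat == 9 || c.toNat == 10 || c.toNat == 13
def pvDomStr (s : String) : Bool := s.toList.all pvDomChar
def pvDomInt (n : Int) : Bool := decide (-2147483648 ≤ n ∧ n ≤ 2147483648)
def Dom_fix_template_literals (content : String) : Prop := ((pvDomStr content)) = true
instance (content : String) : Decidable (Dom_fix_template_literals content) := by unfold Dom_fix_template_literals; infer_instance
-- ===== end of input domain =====

-- B replaces A's in_code_block state machine by a block-at-a-time scan; B keeps the
-- content of a final unclosed code block that A silently drops (see D_ below).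

-- shared helper: content.split('\n') (the separator is the nonempty literal "\n", so split? is always some)
def pvLines (content : String) : List String := (PySem.Str.split? content "\n").getD []

-- shared helper: Python's  line.strip().startswith('```')
def pvFence (l : String) : Bool := PySem.Str.startswith (PySem.Str.strip l) "```"

-- shared helper: ['{% raw %}'] + blk + ['{% endraw %}'] when '${' occurs in '\n'.join(blk), else blk
def pvWrap (blk : List String) : List String :=
  if PySem.Str.isIn "${" (PySem.Str.join "\n" blk)
  then "{% raw %}" :: blk ++ ["{% endraw %}"] else blk

-- ===== PORT A =====
-- one iteration of A's for-loop over the state (result_lines, in_code_block, code_block_lines)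
def pvStepA (st : List String × Bool × List String) (line : String) : List String × Bool × List String :=
  if pvFence line then
    if st.2.1 then (st.1 ++ pvWrap st.2.2 ++ [line], false, [])
    else (st.1 ++ [line], true, st.2.2)
  else if st.2.1 then (st.1, st.2.1, st.2.2 ++ [line])
  else (st.1 ++ [line], st.2.1, st.2.2)

-- literal transliteration of A: fold the loop body over the lines, join result_lines
def fix_template_literals (content : String) : String :=
  let lines := pvLines content
  let st := lines.foldl pvStepA ([], false, [])
  PySem.Str.join "\n" st.1

-- ===== PORT B =====
-- Source B's outer while-loop (fuel = number of remaining lines makes the recursion structural);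
-- the inner fence-seeking while-loop is takeWhile/dropWhile over the remaining lines
def pvAltGo : Nat → List String → List String
  | 0, _ => []
  | _ + 1, [] => []
  | fuel + 1, l :: rest =>
    if pvFence l then
      let block := rest.takeWhile (fun x => !pvFence x)
      match rest.dropWhile (fun x => !pvFence x) with
      | [] => l :: block                                    -- unclosed final block: keep content
      | f :: tl => l :: (pvWrap block ++ f :: pvAltGo fuel tl)
    else l :: pvAltGo fuel rest

def fix_template_literals_alt (content : String) : String :=
  let lines := pvLines content
  PySem.Str.join "\n" (pvAltGo lines.length lines)

-- ===== PRECONDITION & SPEC =====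
-- On inputs whose number of fence lines is odd and whose last line is not a fence (a final
-- unclosed code block with content), A silently drops the lines after the last fence while
-- B keeps them; keeping the author's content is the intended behaviour.
def D_fix_template_literals (content : String) : Prop :=
  (pvLines content).countP (fun l => pvFence l) % 2 = 1 ∧
  pvFence ((pvLines content).getLastD "") = false
instance (content : String) : Decidable (D_fix_template_literals content) := by
  unfold D_fix_template_literals; infer_instance

def Spec_fix_template_literals (content : String) (out : String) : Prop :=
  ¬ D_fix_template_literals content → out = fix_template_literals_alt content
instance (content : String) (out : String) : Decidable (Spec_fix_template_literals content out) := by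
  unfold Spec_fix_template_literals; infer_instance

def pvDiffWitness_fix_template_literals : String := "```\n${x}"
def pvDiffWitnessOut_fix_template_literals : String × String := ("```", "```\n${x}")

-- ===== CLAIM (what is proved, stated in full; the proofs are below) =====
def Claim_unchanged_fix_template_literals : Prop := ∀ (content : String), Dom_fix_template_literals content → Spec_fix_template_literals content (fix_template_literals content)
def Claim_changed_fix_template_literals : Prop := Dom_fix_template_literals (pvDiffWitness_fix_template_literals) ∧ D_fix_template_literals (pvDiffWitness_fix_template_literals) ∧ fix_template_literals (pvDiffWitness_fix_template_literals) = pvDiffWitnessOut_fix_template_literals.1 ∧ fix_template_literals_alt (pvDiffWitness_fix_template_literals) = pvDiffWitnessOut_fix_template_literals.2 ∧ pvDiffWitnessOut_fix_template_literals.1 ≠ pvDiffWitnessOut_fix_template_literals.2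
def Claim_exact_fix_template_literals : Prop := ∀ (content : String), Dom_fix_template_literals content → D_fix_template_literals content → fix_template_literals content ≠ fix_template_literals_alt content

-- ===== LEMMAS AND PROOFS =====

-- A's loop, re-expressed recursively: pvGoA = out of a code block, pvInA = inside one
mutual
def pvGoA : List String → List String
  | [] => []
  | l :: rest => if pvFence l then l :: pvInA [] rest else l :: pvGoA rest
  termination_by lines => lines.length
def pvInA : List String → List String → List String
  | _, [] => []                                             -- A drops an unclosed block
  | blk, l :: rest =>
    if pvFence l then pvWrap blk ++ l :: pvGoA rest else pvInA (blk ++ [l]) rest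
  termination_by _ lines => lines.length
end

-- ¬ D_ , as a condition on the line list
def pvP (lines : List String) : Prop :=
  lines.countP (fun l => pvFence l) % 2 = 0 ∨ pvFence (lines.getLastD "") = true

theorem pvGetLastD_congr {α : Type} (xs : List α) (a b : α) (h : xs ≠ []) :
    xs.getLastD a = xs.getLastD b := by
  cases xs with
  | nil => exact absurd rfl h
  | cons y t => rw [List.getLastD_cons, List.getLastD_cons]

theorem pvGetLastD_mem {α : Type} (xs : List α) (d : α) (h : xs ≠ []) : xs.getLastD d ∈ xs := by
  cases xs with
  | nil => exact absurd rfl h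
  | cons y t =>
    rw [List.getLastD_eq_getLast?, List.getLast?_eq_some_getLast (by simp)]
    exact List.getLast_mem _

theorem pvGetLastD_cons_ne {α : Type} (l : α) (d : α) (rest : List α) (h : rest ≠ []) :
    (l :: rest).getLastD d = rest.getLastD d := by
  rw [List.getLastD_cons]; exact pvGetLastD_congr rest l d h

theorem pvGetLastD_append {α : Type} (d : α) (xs ys : List α) (h : ys ≠ []) :
    (xs ++ ys).getLastD d = ys.getLastD d := by
  induction xs with
  | nil => rfl
  | cons x t ih =>
    rw [List.cons_append, pvGetLastD_cons_ne x d (t ++ ys) (by simp [h]), ih]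

theorem pvFoldA (lines : List String) :
    (∀ res, (List.foldl pvStepA (res, false, []) lines).1 = res ++ pvGoA lines) ∧
    (∀ res blk, (List.foldl pvStepA (res, true, blk) lines).1 = res ++ pvInA blk lines) := by
  induction lines with
  | nil => simp [pvGoA, pvInA]
  | cons l rest ih =>
    constructor
    · intro res
      rw [List.foldl_cons]
      by_cases hf : pvFence l = true
      · have hstep : pvStepA (res, false, []) l = (res ++ [l], true, []) := by
          simp [pvStepA, hf]
        rw [hstep, ih.2]
        simp [pvGoA, hf]
      · have hstep : pvStepA (res, false, []) l = (res ++ [l], false, []) := by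
          simp [pvStepA, hf]
        rw [hstep, ih.1]
        simp [pvGoA, hf]
    · intro res blk
      rw [List.foldl_cons]
      by_cases hf : pvFence l = true
      · have hstep : pvStepA (res, true, blk) l = (res ++ pvWrap blk ++ [l], false, []) := by
          simp [pvStepA, hf]
        rw [hstep, ih.1]
        simp [pvInA, hf]
      · have hstep : pvStepA (res, true, blk) l = (res, true, blk ++ [l]) := by
          simp [pvStepA, hf]
        rw [hstep, ih.2]
        simp [pvInA, hf]

theorem pvInA_dropNil (rest : List String)
    (hd : rest.dropWhile (fun x => !pvFence x) = []) : ∀ blk, pvInA blk rest = [] := by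
  induction rest with
  | nil => intro blk; simp [pvInA]
  | cons l r ih =>
    intro blk
    rw [List.dropWhile_cons] at hd
    by_cases hf : pvFence l = true
    · simp [hf] at hd
    · simp [hf, -List.dropWhile_eq_nil_iff] at hd
      simp [pvInA, hf, ih hd]

theorem pvInA_dropCons (rest : List String) (f : String) (tl : List String)
    (hd : rest.dropWhile (fun x => !pvFence x) = f :: tl) : ∀ blk,
    pvInA blk rest = pvWrap (blk ++ rest.takeWhile (fun x => !pvFence x)) ++ f :: pvGoA tl := by
  induction rest with
  | nil => intro blk; simp at hd
  | cons l r ih =>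
    intro blk
    rw [List.dropWhile_cons] at hd
    by_cases hf : pvFence l = true
    · simp [hf] at hd
      obtain ⟨hdl, hdr⟩ := hd
      subst hdl; subst hdr
      simp [pvInA, hf]
    · simp [hf] at hd
      simp [pvInA, hf, ih hd (blk ++ [l]), List.append_assoc]

-- the head of a nonempty dropWhile fails the predicate
theorem pvDropHead (rest : List String) (f : String) (tl : List String)
    (hd : rest.dropWhile (fun x => !pvFence x) = f :: tl) : pvFence f = true := by
  have := List.head?_dropWhile_not (fun x => !pvFence x) rest
  rw [hd] at this
  simpa using this

-- splitting the lines at the first fence of `rest`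
theorem pvRestSplit (rest : List String) (f : String) (tl : List String)
    (hd : rest.dropWhile (fun x => !pvFence x) = f :: tl) :
    rest = rest.takeWhile (fun x => !pvFence x) ++ f :: tl := by
  conv_lhs => rw [← List.takeWhile_append_dropWhile (p := fun x => !pvFence x) (l := rest)]
  rw [hd]

theorem pvTakeCount (rest : List String) :
    (rest.takeWhile (fun x => !pvFence x)).countP (fun l => pvFence l) = 0 := by
  refine List.countP_eq_zero.mpr ?_
  intro x hx
  have := List.mem_takeWhile_imp hx
  simpa using this

theorem pvLastAfterFence (l : String) (tw : List String) (f : String) (tl : List String)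
    (htl : tl ≠ []) : (l :: (tw ++ f :: tl)).getLastD "" = tl.getLastD "" := by
  have h1 : l :: (tw ++ f :: tl) = (l :: tw ++ [f]) ++ tl := by simp
  rw [h1, pvGetLastD_append _ _ _ htl]

-- outside D_, A's recursion equals B's
theorem pvGoA_eq (fuel : Nat) : ∀ lines : List String, lines.length ≤ fuel →
    pvP lines → pvGoA lines = pvAltGo fuel lines := by
  induction fuel with
  | zero =>
    intro lines h _
    have : lines = [] := List.eq_nil_of_length_eq_zero (Nat.le_zero.mp h)
    simp [this, pvGoA, pvAltGo]
  | succ fuel ih =>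
    intro lines hlen hP
    cases lines with
    | nil => simp [pvGoA, pvAltGo]
    | cons l rest =>
      by_cases hf : pvFence l = true
      · cases hd : rest.dropWhile (fun x => !pvFence x) with
        | nil =>
          have hall : ∀ x ∈ rest, pvFence x = false := by
            intro x hx
            have := List.dropWhile_eq_nil_iff.mp hd x hx
            simpa using this
          have hrest : rest = [] := by
            by_contra hne
            rcases hP with hc | hl
            · have h0 : rest.countP (fun l => pvFence l) = 0 :=
                List.countP_eq_zero.mpr (fun x hx => by simp [hall x hx])
              simp [hf, h0] at hc
            · have hmem : (l :: rest).getLastD "" ∈ rest := by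
                rw [List.getLastD_cons]
                exact pvGetLastD_mem rest l hne
              rw [hall _ hmem] at hl
              exact Bool.false_ne_true hl
          subst hrest
          simp [pvGoA, pvInA, pvAltGo, hf]
        | cons f tl =>
          have hfF : pvFence f = true := pvDropHead rest f tl hd
          have hsplit := pvRestSplit rest f tl hd
          have hlen' : tl.length ≤ fuel := by
            have := congrArg List.length hsplit
            simp at this
            simp at hlen
            omega
          have hcount : (l :: rest).countP (fun l => pvFence l)
              = 2 + tl.countP (fun l => pvFence l) := by
            conv_lhs => rw [hsplit]
            simp [List.countP_append, hf, hfF, pvTakeCount]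
            omega
          have htP : pvP tl := by
            rcases hP with hc | hl
            · left; rw [hcount] at hc; omega
            · cases htl : tl with
              | nil => left; simp
              | cons y t =>
                right
                rw [hsplit, pvLastAfterFence l _ f tl (by simp [htl])] at hl
                rw [← htl]
                exact hl
          have hgo : pvGoA (l :: rest) = l :: (pvWrap (rest.takeWhile (fun x => !pvFence x)) ++ f :: pvGoA tl) := by
            simp [pvGoA, hf, pvInA_dropCons rest f tl hd []]
          rw [hgo, ih tl hlen' htP]
          simp [pvAltGo, hf, hd]
      · have hP' : pvP rest := by
          rcases hP with hc | hl
          · left; simpa [List.countP_cons, hf] using hc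
          · cases rest with
            | nil => left; simp
            | cons y t =>
              right
              rwa [pvGetLastD_cons_ne l "" (y :: t) (by simp)] at hl
        have hlen' : rest.length ≤ fuel := by simp at hlen; omega
        simp [pvGoA, pvAltGo, hf]
        exact ih rest hlen' hP'

-- inside D_, B's line list is A's line list plus the dropped, nonempty block
theorem pvDiffAppend (fuel : Nat) : ∀ lines : List String, lines.length ≤ fuel →
    lines.countP (fun l => pvFence l) % 2 = 1 → pvFence (lines.getLastD "") = false →
    ∃ bl, bl ≠ [] ∧ pvAltGo fuel lines = pvGoA lines ++ bl := by
  induction fuel with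
  | zero =>
    intro lines h h1 _
    have : lines = [] := List.eq_nil_of_length_eq_zero (Nat.le_zero.mp h)
    subst this; simp at h1
  | succ fuel ih =>
    intro lines hlen h1 h2
    cases lines with
    | nil => simp at h1
    | cons l rest =>
      by_cases hf : pvFence l = true
      · cases hd : rest.dropWhile (fun x => !pvFence x) with
        | nil =>
          have hrest : rest ≠ [] := by
            intro hE
            subst hE
            simp at h2
            rw [h2] at hf
            exact Bool.false_ne_true hf
          refine ⟨rest, hrest, ?_⟩
          have htake : rest.takeWhile (fun x => !pvFence x) = rest := by
            refine List.takeWhile_eq_self_iff.mpr ?_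
            intro x hx
            have := List.dropWhile_eq_nil_iff.mp hd x hx
            simpa using this
          simp [pvAltGo, pvGoA, hf, hd, htake, pvInA_dropNil rest hd []]
        | cons f tl =>
          have hfF : pvFence f = true := pvDropHead rest f tl hd
          have hsplit := pvRestSplit rest f tl hd
          have htl : tl ≠ [] := by
            intro hE
            subst hE
            rw [hsplit] at h2
            have : (l :: (rest.takeWhile (fun x => !pvFence x) ++ [f])).getLastD "" = f := by
              have h3 : l :: (rest.takeWhile (fun x => !pvFence x) ++ [f])
                  = (l :: rest.takeWhile (fun x => !pvFence x)) ++ [f] := by simp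
              rw [h3, pvGetLastD_append _ _ _ (by simp)]
              rfl
            rw [this] at h2
            rw [h2] at hfF
            exact Bool.false_ne_true hfF
          have hlen' : tl.length ≤ fuel := by
            have := congrArg List.length hsplit
            simp at this
            simp at hlen
            omega
          have hcount : (l :: rest).countP (fun l => pvFence l)
              = 2 + tl.countP (fun l => pvFence l) := by
            conv_lhs => rw [hsplit]
            simp [List.countP_append, hf, hfF, pvTakeCount]
            omega
          have h1' : tl.countP (fun l => pvFence l) % 2 = 1 := by
            rw [hcount] at h1; omega
          have h2' : pvFence (tl.getLastD "") = false := by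
            rw [hsplit, pvLastAfterFence l _ f tl htl] at h2
            exact h2
          obtain ⟨bl, hbl, heq⟩ := ih tl hlen' h1' h2'
          refine ⟨bl, hbl, ?_⟩
          have hgo : pvGoA (l :: rest) = l :: (pvWrap (rest.takeWhile (fun x => !pvFence x)) ++ f :: pvGoA tl) := by
            simp [pvGoA, hf, pvInA_dropCons rest f tl hd []]
          rw [hgo]
          simp [pvAltGo, hf, hd, heq]
      · have hrest : rest ≠ [] := by
          intro hE
          subst hE
          simp [hf] at h1
        have h1' : rest.countP (fun l => pvFence l) % 2 = 1 := by
          simpa [hf] using h1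
        have h2' : pvFence (rest.getLastD "") = false := by
          cases rest with
          | nil => exact absurd rfl hrest
          | cons y t =>
            have hx : (l :: (y :: t)).getLastD "" = (y :: t).getLastD "" :=
              pvGetLastD_cons_ne l "" (y :: t) (List.cons_ne_nil y t)
            rw [hx] at h2
            exact h2
        have hlen' : rest.length ≤ fuel := by
          have := hlen
          simp only [List.length_cons] at this
          omega
        obtain ⟨bl, hbl, heq⟩ := ih rest hlen' h1' h2'
        refine ⟨bl, hbl, ?_⟩
        simp [pvAltGo, pvGoA, hf, heq]

-- join over a split list (both halves nonempty)
theorem pvJoinAppend (s : List Char) (xs ys : List (List Char)) (hx : xs ≠ []) (hy : ys ≠ []) :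
    PySem.Chars.join s (xs ++ ys) = PySem.Chars.join s xs ++ s ++ PySem.Chars.join s ys := by
  induction xs with
  | nil => exact absurd rfl hx
  | cons x xs' ih =>
    cases xs' with
    | nil =>
      cases ys with
      | nil => exact absurd rfl hy
      | cons y t =>
        simp [PySem.Chars.join_cons_cons, PySem.Chars.join_singleton]
    | cons x' t' =>
      have h1 : (x :: x' :: t') ++ ys = x :: x' :: (t' ++ ys) := by simp
      rw [h1, PySem.Chars.join_cons_cons]
      have h2 : x' :: (t' ++ ys) = (x' :: t') ++ ys := by simp
      rw [h2, ih (by simp), PySem.Chars.join_cons_cons]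
      simp [List.append_assoc]

theorem pvGoA_ne_nil (l : String) (rest : List String) : pvGoA (l :: rest) ≠ [] := by
  simp only [pvGoA]
  split_ifs <;> simp

-- A's port computes join of pvGoA
theorem pvA_eq_goA (content : String) :
    fix_template_literals content = PySem.Str.join "\n" (pvGoA (pvLines content)) := by
  show PySem.Str.join "\n" (List.foldl pvStepA ([], false, []) (pvLines content)).1 = _
  rw [(pvFoldA (pvLines content)).1 []]
  simp

-- ===== VERDICT (by name: the statement is the Claim_ definition above) =====
theorem pvB_eq_altGo (content : String) :
    fix_template_literals_alt content
      = PySem.Str.join "\n" (pvAltGo (pvLines content).length (pvLines content)) := rfl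

theorem fix_template_literals_spec : Claim_unchanged_fix_template_literals := by
  intro content _ hD
  unfold D_fix_template_literals at hD
  have hP : pvP (pvLines content) := by
    rcases Decidable.not_and_iff_not_or_not.mp hD with h | h
    · left; omega
    · right; simpa using h
  show fix_template_literals content = fix_template_literals_alt content
  rw [pvA_eq_goA content, pvB_eq_altGo content,
    pvGoA_eq (pvLines content).length (pvLines content) (le_refl _) hP]

theorem fix_template_literals_changed : Claim_changed_fix_template_literals := by
  unfold Claim_changed_fix_template_literals; decide

theorem fix_template_literals_tight : Claim_exact_fix_template_literals := by
  intro content _ hD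
  unfold D_fix_template_literals at hD
  obtain ⟨h1, h2⟩ := hD
  obtain ⟨bl, hbl, heq⟩ :=
    pvDiffAppend (pvLines content).length (pvLines content) (le_refl _) h1 h2
  have hlines : pvLines content ≠ [] := by
    intro hE; rw [hE] at h1; simp at h1
  intro hEq
  rw [pvA_eq_goA content] at hEq
  have hEq' : PySem.Str.join "\n" (pvGoA (pvLines content))
      = PySem.Str.join "\n" (pvGoA (pvLines content) ++ bl) := by
    rw [hEq, pvB_eq_altGo content, heq]
  have hgo : pvGoA (pvLines content) ≠ [] := by
    cases hL : pvLines content with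
    | nil => exact absurd hL hlines
    | cons l rest => exact pvGoA_ne_nil l rest
  have hTL := congrArg String.toList hEq'
  rw [PySem.Str.toList_join, PySem.Str.toList_join, List.map_append] at hTL
  rw [pvJoinAppend _ _ _ (by simpa using hgo) (by simpa using hbl)] at hTL
  have := congrArg List.length hTL
  simp at this
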